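-- pv_equiv track=rewrite | github.com/NeoZorK/neozork-hld-prediction | src/plotting/dual_chart_plot.py | validate_indicator_rule
-- ===== SOURCE A (Python) =====
-- def get_supported_indicators() -> set:
--     """
--     Get set of supported indicators for dual chart mode.
--
--     Returns:
--         set: Set of supported indicator names
--     """
--     return {
--         'rsi', 'rsi_mom', 'rsi_div', 'macd', 'stoch', 'ema', 'bb', 'atr',
--         'cci', 'vwap', 'pivot', 'hma', 'tsf', 'monte', 'kelly', 'putcallratio', 'cot', 'feargreed', 'fg', 'donchain',
--         'fibo', 'obv', 'stdev', 'adx', 'sar', 'supertrend', 'schr_rost', 'schr_trend', 'schr_wave2'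
--     }
--
-- def validate_indicator_rule(rule: str) -> bool:
--     """
--     Validate indicator rule format.
--
--     Args:
--         rule (str): Rule string to validate
--
--     Returns:
--         bool: True if rule is valid
--     """
--     if not rule:
--         return False
--
--     # Special case for SCHR_DIR (no parameters but valid)
--     if rule.lower().strip() == 'schr_dir':
--         return True
--
--     # Check for parameterized indicators (containing ':')
--     if ':' not in rule:
--         return False
--
--     indicator_name = rule.split(':', 1)[0].lower().strip()
--     params_str = rule.split(':', 1)[1].strip()
--
--     # Check if indicator is supported
--     if indicator_name not in get_supported_indicators():
--         return False
--
--     # Basic parameter validation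
--     params = [p.strip() for p in params_str.split(',')]
--
--     # Validate based on indicator type
--     if indicator_name == 'rsi':
--         if len(params) != 4:
--             return False
--         try:
--             int(params[0])  # period
--             float(params[1])  # oversold
--             float(params[2])  # overbought
--             if params[3].lower() not in ['open', 'close']:
--                 return False
--         except (ValueError, IndexError):
--             return False
--
--     elif indicator_name == 'macd':
--         if len(params) != 4:
--             return False
--         try:
--             int(params[0])  # fast_period
--             int(params[1])  # slow_period
--             int(params[2])  # signal_period
--             if params[3].lower() not in ['open', 'close']:
--                 return False
--         except (ValueError, IndexError):
--             return False
--
--     elif indicator_name == 'ema':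
--         if len(params) != 2:
--             return False
--         try:
--             int(params[0])  # period
--             if params[1].lower() not in ['open', 'close']:
--                 return False
--         except (ValueError, IndexError):
--             return False
--
--     # Add more validation for other indicators as needed
--
--     return True
-- ===== SOURCE B (Python) =====
-- def get_supported_indicators() -> set:
--     return {
--         'rsi', 'rsi_mom', 'rsi_div', 'macd', 'stoch', 'ema', 'bb', 'atr',
--         'cci', 'vwap', 'pivot', 'hma', 'tsf', 'monte', 'kelly', 'putcallratio', 'cot', 'feargreed', 'fg', 'donchain',
--         'fibo', 'obv', 'stdev', 'adx', 'sar', 'supertrend', 'schr_rost', 'schr_trend', 'schr_wave2'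
--     }
--
-- # data-driven validation table: indicator -> ordered per-parameter checks
-- _SPECS = {
--     'rsi': ('int', 'float', 'float', 'price'),
--     'macd': ('int', 'int', 'int', 'price'),
--     'ema': ('int', 'price'),
-- }
--
-- def validate_indicator_rule(rule: str) -> bool:
--     if not rule:
--         return False
--     if rule.lower().strip() == 'schr_dir':
--         return True
--     if ':' not in rule:
--         return False
--     head, params_str = rule.split(':', 1)
--     name = head.lower().strip()
--     if name not in get_supported_indicators():
--         return False
--     params = [p.strip() for p in params_str.strip().split(',')]
--     spec = _SPECS.get(name)
--     if spec is None:
--         return True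
--     if len(params) != len(spec):
--         return False
--     for check, value in zip(spec, params):
--         try:
--             if check == 'int':
--                 int(value)
--             elif check == 'float':
--                 float(value)
--             elif value.lower() not in ('open', 'close'):
--                 return False
--         except ValueError:
--             return False
--     return True
-- ===== Notes on version B (the rewrite author's own statement) =====
-- stated objective: simpler
-- what changed: Replaced A's repeated per-indicator if/elif validation blocks by a spec table mapping indicator name to an ordered list of per-field checks plus one uniform zip-and-check loop.
import Mathlib
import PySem

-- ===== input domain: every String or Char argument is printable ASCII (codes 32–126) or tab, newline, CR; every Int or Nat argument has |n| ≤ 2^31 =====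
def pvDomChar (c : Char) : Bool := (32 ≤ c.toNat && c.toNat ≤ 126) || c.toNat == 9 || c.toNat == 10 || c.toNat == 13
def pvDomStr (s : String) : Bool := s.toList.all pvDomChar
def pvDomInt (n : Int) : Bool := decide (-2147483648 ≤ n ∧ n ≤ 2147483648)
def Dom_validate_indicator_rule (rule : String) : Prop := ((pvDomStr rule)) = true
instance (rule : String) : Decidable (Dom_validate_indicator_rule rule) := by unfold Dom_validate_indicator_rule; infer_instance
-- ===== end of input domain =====

-- B replaces A's per-indicator if/elif blocks by a spec table (indicator -> list of per-field checks) and one uniform zip-and-check loop; objective: simpler/data-driven, no speed claim.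

-- Shared helper: validity of Python's float(s) conversion (float() is not in PySem; ported by hand,
-- exact on the ASCII domain: strip, optional sign, inf/infinity/nan case-insensitive, or
-- digits-with-single-underscores mantissa with optional '.' part and optional e/E exponent).
-- Both Pythons call float() on the same values, so both ports share this helper.

-- consume the rest of a digit run: digits, with a single '_' allowed between digits
def pvDigRest : List Char → List Char
  | [] => []
  | '_' :: c :: r => if PySem.Chars.isdigit c then pvDigRest r else '_' :: c :: r
  | c :: r => if PySem.Chars.isdigit c then pvDigRest r else c :: r

-- parse a nonempty digit run (Python's \d(_?\d)*); none = no leading digit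
def pvD : List Char → Option (List Char)
  | c :: r => if PySem.Chars.isdigit c then some (pvDigRest r) else none
  | [] => none

def pvExpBody (r : List Char) : Bool :=
  let r' := match r with
    | '+' :: t => t
    | '-' :: t => t
    | _ => r
  match pvD r' with
  | some [] => true
  | _ => false

-- optional exponent, then end of string
def pvExpOk : List Char → Bool
  | [] => true
  | 'e' :: r => pvExpBody r
  | 'E' :: r => pvExpBody r
  | _ => false

-- after the integer digit run: optional '.' with optional fraction digits, then exponent
def pvAfterD : List Char → Bool
  | '.' :: r =>
    (match pvD r with
     | some r2 => pvExpOk r2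
     | none => pvExpOk r)
  | r => pvExpOk r

def pvNum (s : List Char) : Bool :=
  match pvD s with
  | some r => pvAfterD r
  | none =>
    match s with
    | '.' :: r =>
      (match pvD r with
       | some r2 => pvExpOk r2
       | none => false)
    | _ => false

-- float(s) succeeds (no ValueError); exact on the ASCII domain
def pvFloatOk (s : String) : Bool :=
  let t := PySem.Chars.strip s.toList
  let t1 := match t with
    | '+' :: r => r
    | '-' :: r => r
    | _ => t
  let tl := PySem.Chars.lower t1
  if tl == "inf".toList || tl == "infinity".toList || tl == "nan".toList then true
  else pvNum t1

-- ===== PORT A =====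
def get_supported_indicators : PySem.Set String :=
  PySem.Set.ofList ["rsi", "rsi_mom", "rsi_div", "macd", "stoch", "ema", "bb", "atr",
    "cci", "vwap", "pivot", "hma", "tsf", "monte", "kelly", "putcallratio", "cot", "feargreed", "fg", "donchain",
    "fibo", "obv", "stdev", "adx", "sar", "supertrend", "schr_rost", "schr_trend", "schr_wave2"]

-- A's per-indicator if/elif validation chain (the try blocks: early False on a failing
-- conversion / membership test; IndexError cannot occur since the length was checked,
-- rendered by the catch-all pattern returning false)
def pvACheck (name : String) (params : List String) : Bool :=
  if name == "rsi" then
    if params.length != 4 then false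
    else
      match params with
      | [p0, p1, p2, p3] =>
        if !(PySem.Int.ofStr? p0).isSome then false
        else if !pvFloatOk p1 then false
        else if !pvFloatOk p2 then false
        else if !(["open", "close"].contains (PySem.Str.lower p3)) then false
        else true
      | _ => false
  else if name == "macd" then
    if params.length != 4 then false
    else
      match params with
      | [p0, p1, p2, p3] =>
        if !(PySem.Int.ofStr? p0).isSome then false
        else if !(PySem.Int.ofStr? p1).isSome then false
        else if !(PySem.Int.ofStr? p2).isSome then false
        else if !(["open", "close"].contains (PySem.Str.lower p3)) then false
        else true
      | _ => false
  else if name == "ema" then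
    if params.length != 2 then false
    else
      match params with
      | [p0, p1] =>
        if !(PySem.Int.ofStr? p0).isSome then false
        else if !(["open", "close"].contains (PySem.Str.lower p1)) then false
        else true
      | _ => false
  else true

def validate_indicator_rule (rule : String) : Bool :=
  if rule == "" then false
  else if PySem.Str.strip (PySem.Str.lower rule) == "schr_dir" then true
  else if !PySem.Str.isIn ":" rule then false
  else
    match PySem.Str.splitMax? rule ":" 1 with
    | some (h :: t :: _) =>
      let indicator_name := PySem.Str.strip (PySem.Str.lower h)
      let params_str := PySem.Str.strip t
      if !(get_supported_indicators.contains indicator_name) then false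
      else
        let params := ((PySem.Str.split? params_str ",").getD []).map PySem.Str.strip
        pvACheck indicator_name params
    | _ => false  -- unreachable: ':' ∈ rule gives two pieces

-- ===== PORT B =====
inductive PvCheck
  | cint
  | cfloat
  | cprice
deriving DecidableEq, Repr

-- the _SPECS table
def pvSpecs : PySem.Dict String (List PvCheck) :=
  PySem.Dict.mk [("rsi", [PvCheck.cint, PvCheck.cfloat, PvCheck.cfloat, PvCheck.cprice]),
                 ("macd", [PvCheck.cint, PvCheck.cint, PvCheck.cint, PvCheck.cprice]),
                 ("ema", [PvCheck.cint, PvCheck.cprice])]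

def pvCheckOne (c : PvCheck) (v : String) : Bool :=
  match c with
  | PvCheck.cint => (PySem.Int.ofStr? v).isSome
  | PvCheck.cfloat => pvFloatOk v
  | PvCheck.cprice => ["open", "close"].contains (PySem.Str.lower v)

-- B's uniform loop: look the spec up, compare lengths, run every (check, value) pair
def pvBCheck (name : String) (params : List String) : Bool :=
  match PySem.Dict.get? pvSpecs name with
  | none => true
  | some spec =>
    if params.length != spec.length then false
    else (spec.zip params).all fun cv => pvCheckOne cv.1 cv.2

def validate_indicator_rule_alt (rule : String) : Bool :=
  if rule == "" then false
  else if PySem.Str.strip (PySem.Str.lower rule) == "schr_dir" then true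
  else if !PySem.Str.isIn ":" rule then false
  else
    match PySem.Str.splitMax? rule ":" 1 with
    | some (h :: t :: _) =>
      let name := PySem.Str.strip (PySem.Str.lower h)
      let params_str := PySem.Str.strip t
      if !(get_supported_indicators.contains name) then false
      else
        let params := ((PySem.Str.split? params_str ",").getD []).map PySem.Str.strip
        pvBCheck name params
    | _ => false

-- ===== PRECONDITION & SPEC =====
def Spec_validate_indicator_rule (rule : String) (out : Bool) : Prop := out = validate_indicator_rule_alt rule
instance (rule : String) (out : Bool) : Decidable (Spec_validate_indicator_rule rule out) := by unfold Spec_validate_indicator_rule; infer_instance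

-- ===== CLAIM (what is proved, stated in full; the proofs are below) =====
def Claim_equal_validate_indicator_rule : Prop := ∀ (rule : String), Dom_validate_indicator_rule rule → Spec_validate_indicator_rule rule (validate_indicator_rule rule)

-- ===== LEMMAS AND PROOFS =====

-- A's if/elif chain and B's table-driven loop agree on every (name, params)
theorem pvCheck_eq_rsi : ∀ params, pvACheck "rsi" params = pvBCheck "rsi" params
  | [a, b, c, d] => by
    cases ho : PySem.Int.ofStr? a <;> cases hb : pvFloatOk b <;> cases hc : pvFloatOk c <;>
      by_cases hdo : PySem.Str.lower d = "open" <;> by_cases hdc : PySem.Str.lower d = "close" <;>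
      simp [pvACheck, pvBCheck, pvSpecs, PySem.Dict.get?, pvCheckOne, ho, hb, hc, hdo, hdc]
  | [] => by simp [pvACheck, pvBCheck, pvSpecs, PySem.Dict.get?]
  | [a] => by simp [pvACheck, pvBCheck, pvSpecs, PySem.Dict.get?]
  | [a, b] => by simp [pvACheck, pvBCheck, pvSpecs, PySem.Dict.get?]
  | [a, b, c] => by simp [pvACheck, pvBCheck, pvSpecs, PySem.Dict.get?]
  | a :: b :: c :: d :: e :: rest => by
    simp [pvACheck, pvBCheck, pvSpecs, PySem.Dict.get?]

theorem pvCheck_eq_macd : ∀ params, pvACheck "macd" params = pvBCheck "macd" params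
  | [a, b, c, d] => by
    cases h1 : PySem.Int.ofStr? a <;> cases h2 : PySem.Int.ofStr? b <;> cases h3 : PySem.Int.ofStr? c <;>
      by_cases hdo : PySem.Str.lower d = "open" <;> by_cases hdc : PySem.Str.lower d = "close" <;>
      simp [pvACheck, pvBCheck, pvSpecs, PySem.Dict.get?, pvCheckOne, h1, h2, h3, hdo, hdc]
  | [] => by simp [pvACheck, pvBCheck, pvSpecs, PySem.Dict.get?]
  | [a] => by simp [pvACheck, pvBCheck, pvSpecs, PySem.Dict.get?]
  | [a, b] => by simp [pvACheck, pvBCheck, pvSpecs, PySem.Dict.get?]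
  | [a, b, c] => by simp [pvACheck, pvBCheck, pvSpecs, PySem.Dict.get?]
  | a :: b :: c :: d :: e :: rest => by
    simp [pvACheck, pvBCheck, pvSpecs, PySem.Dict.get?]

theorem pvCheck_eq_ema : ∀ params, pvACheck "ema" params = pvBCheck "ema" params
  | [a, b] => by
    cases h1 : PySem.Int.ofStr? a <;>
      by_cases hdo : PySem.Str.lower b = "open" <;> by_cases hdc : PySem.Str.lower b = "close" <;>
      simp [pvACheck, pvBCheck, pvSpecs, PySem.Dict.get?, pvCheckOne, h1, hdo, hdc]
  | [] => by simp [pvACheck, pvBCheck, pvSpecs, PySem.Dict.get?]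
  | [a] => by simp [pvACheck, pvBCheck, pvSpecs, PySem.Dict.get?]
  | a :: b :: c :: rest => by
    simp [pvACheck, pvBCheck, pvSpecs, PySem.Dict.get?]

theorem pvCheck_eq (name : String) (params : List String) :
    pvACheck name params = pvBCheck name params := by
  by_cases h1 : name = "rsi"
  · subst h1; exact pvCheck_eq_rsi params
  by_cases h2 : name = "macd"
  · subst h2; exact pvCheck_eq_macd params
  by_cases h3 : name = "ema"
  · subst h3; exact pvCheck_eq_ema params
  have g1 : (name == "rsi") = false := by simp [h1]
  have g2 : (name == "macd") = false := by simp [h2]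
  have g3 : (name == "ema") = false := by simp [h3]
  have e1 : ("rsi" == name) = false := by simp [Ne.symm h1]
  have e2 : ("macd" == name) = false := by simp [Ne.symm h2]
  have e3 : ("ema" == name) = false := by simp [Ne.symm h3]
  simp [pvACheck, pvBCheck, pvSpecs, PySem.Dict.get?, g1, g2, g3, e1, e2, e3]

-- ===== VERDICT (by name: the statement is the Claim_ definition above) =====
theorem validate_indicator_rule_spec : Claim_equal_validate_indicator_rule := by
  intro rule _
  show validate_indicator_rule rule = validate_indicator_rule_alt rule
  simp only [validate_indicator_rule, validate_indicator_rule_alt, pvCheck_eq]
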